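-- pv_equiv track=rewrite | github.com/Glakra/MATHWIZ | streamlit_app/Grades/Year 5/W.Three-dimensional_figures/threedimensional_figures_viewed_from_different_perspectives.py | U_hall
-- ===== SOURCE A (Python) =====
-- def empty(w,d,h,val=False): return [[[val for _ in range(h)] for _ in range(d)] for _ in range(w)]
--
-- def U_hall(w=5,d=4,h=3):
--     S = empty(w,d,h)
--     for x in range(w):
--         for z in range(h-1):
--             S[x][0][z] = True; S[x][d-1][z] = True
--     for y in range(d):
--         for z in range(h-1): S[0][y][z] = True
--     for x in range(w): S[x][0][h-1] = True
--     return S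
-- ===== SOURCE B (Python) =====
-- def U_hall(w=5, d=4, h=3):
--     # one pass: each cell is computed directly from a wall predicate
--     return [[[(y == 0 and z == h - 1)
--               or (z < h - 1 and (y == 0 or y == d - 1 or x == 0))
--               for z in range(h)] for y in range(d)] for x in range(w)]
-- ===== Notes on version B (the rewrite author's own statement) =====
-- stated objective: simpler
-- what changed: A allocates an all-False grid and then mutates it with three separate wall-painting loop nests; B builds the grid in a single nested comprehension computing every cell directly from a closed-form wall predicate.
-- outside the precondition, e.g. on U_hall(0, 1, 2): A raises IndexError, B returns []; on U_hall(2, 0, 3): A raises IndexError, B returns [[], []]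
import Mathlib
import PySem

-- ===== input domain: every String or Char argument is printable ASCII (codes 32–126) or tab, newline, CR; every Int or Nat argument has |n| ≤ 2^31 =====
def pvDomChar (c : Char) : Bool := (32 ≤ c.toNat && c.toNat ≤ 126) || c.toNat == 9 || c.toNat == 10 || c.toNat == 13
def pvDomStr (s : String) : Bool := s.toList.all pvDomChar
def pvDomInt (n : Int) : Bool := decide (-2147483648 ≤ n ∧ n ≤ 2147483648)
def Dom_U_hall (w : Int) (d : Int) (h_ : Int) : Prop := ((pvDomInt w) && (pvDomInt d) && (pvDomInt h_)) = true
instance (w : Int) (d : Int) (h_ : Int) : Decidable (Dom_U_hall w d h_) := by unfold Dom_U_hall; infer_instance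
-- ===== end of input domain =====

-- B replaces A's allocate-then-mutate three wall-painting loop nests by a single direct
-- predicate pass over the whole grid (objective: simpler).

-- ===== PORT A =====

-- `xs[i] = f(xs[i])` as a pure update: Python's negative-index rule via pyGet?/pySetD;
-- where Python raises IndexError (index out of range) this returns the list unchanged —
-- those inputs are excluded by Pre_U_hall.
def pvModAt {α : Type} (xs : List α) (i : Int) (f : α → α) : List α :=
  match PySem.List.pyGet? xs i with
  | none => xs
  | some r => PySem.List.pySetD xs i (f r)

-- `S[x][y][z] = v`
def pvSet3 (S : List (List (List Bool))) (x y z : Int) (v : Bool) : List (List (List Bool)) :=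
  pvModAt S x (fun row => pvModAt row y (fun col => PySem.List.pySetD col z v))

def U_hall (w : Int) (d : Int) (h_ : Int) : List (List (List Bool)) :=
  -- S = empty(w, d, h)
  let S0 := (PySem.List.pyRange 0 w 1).map (fun _ =>
              (PySem.List.pyRange 0 d 1).map (fun _ =>
                (PySem.List.pyRange 0 h_ 1).map (fun _ => false)))
  -- for x in range(w): for z in range(h-1): S[x][0][z] = True; S[x][d-1][z] = True
  let S1 := (PySem.List.pyRange 0 w 1).foldl (fun S x =>
              (PySem.List.pyRange 0 (h_ - 1) 1).foldl (fun S z =>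
                pvSet3 (pvSet3 S x 0 z true) x (d - 1) z true) S) S0
  -- for y in range(d): for z in range(h-1): S[0][y][z] = True
  let S2 := (PySem.List.pyRange 0 d 1).foldl (fun S y =>
              (PySem.List.pyRange 0 (h_ - 1) 1).foldl (fun S z =>
                pvSet3 S 0 y z true) S) S1
  -- for x in range(w): S[x][0][h-1] = True
  (PySem.List.pyRange 0 w 1).foldl (fun S x => pvSet3 S x 0 (h_ - 1) true) S2

-- ===== PORT B =====
def U_hall_alt (w : Int) (d : Int) (h_ : Int) : List (List (List Bool)) :=
  (PySem.List.pyRange 0 w 1).map (fun x =>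
    (PySem.List.pyRange 0 d 1).map (fun y =>
      (PySem.List.pyRange 0 h_ 1).map (fun z =>
        (y == 0 && z == h_ - 1) || (decide (z < h_ - 1) && (y == 0 || y == d - 1 || x == 0)))))

-- ===== PRECONDITION & SPEC =====
-- Pre_ excludes exactly the inputs on which A raises IndexError: a nonempty x-range with
-- no rows (d ≤ 0) or no cells (h ≤ 0), and an empty x-range while the back-wall loop
-- still indexes S[0] (d ≥ 1, h ≥ 2).
def Pre_U_hall (w : Int) (d : Int) (h_ : Int) : Prop :=
  (1 ≤ w → 1 ≤ d ∧ 1 ≤ h_) ∧ (w ≤ 0 → d ≤ 0 ∨ h_ ≤ 1)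
instance (w : Int) (d : Int) (h_ : Int) : Decidable (Pre_U_hall w d h_) := by unfold Pre_U_hall; infer_instance
def pvWitness_U_hall : Int × Int × Int := (5, 4, 3)

def Spec_U_hall (w : Int) (d : Int) (h_ : Int) (out : List (List (List Bool))) : Prop := out = U_hall_alt w d h_
instance (w : Int) (d : Int) (h_ : Int) (out : List (List (List Bool))) : Decidable (Spec_U_hall w d h_ out) := by unfold Spec_U_hall; infer_instance

-- ===== CLAIM (what is proved, stated in full; the proofs are below) =====
def Claim_equal_U_hall : Prop := ∀ (w : Int) (d : Int) (h_ : Int), Dom_U_hall w d h_ → Pre_U_hall w d h_ → Spec_U_hall w d h_ (U_hall w d h_)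

-- ===== LEMMAS AND PROOFS =====

-- the grid built from a cell predicate; both A's empty grid and B's result are pvBuild's by rfl
def pvBuild (w d h_ : Int) (f : Int → Int → Int → Bool) : List (List (List Bool)) :=
  (PySem.List.pyRange 0 w 1).map (fun x =>
    (PySem.List.pyRange 0 d 1).map (fun y =>
      (PySem.List.pyRange 0 h_ 1).map (fun z => f x y z)))

theorem pvBuild_congr {w d h_ : Int} {f g : Int → Int → Int → Bool}
    (h : ∀ a b c, f a b c = g a b c) : pvBuild w d h_ f = pvBuild w d h_ g := by
  have : f = g := funext fun a => funext fun b => funext fun c => h a b c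
  rw [this]

theorem pvBuild_congr_mem {w d h_ : Int} {f g : Int → Int → Int → Bool}
    (h : ∀ a b c, 0 ≤ a → a < w → 0 ≤ b → b < d → 0 ≤ c → c < h_ → f a b c = g a b c) :
    pvBuild w d h_ f = pvBuild w d h_ g := by
  unfold pvBuild
  apply List.map_congr_left; intro a ha
  apply List.map_congr_left; intro b hb
  apply List.map_congr_left; intro c hc
  rw [PySem.List.mem_pyRange_one] at ha hb hc
  exact h a b c ha.1 ha.2 hb.1 hb.2 hc.1 hc.2

theorem pvSetD_map_pyRange {α : Type} (g : Int → α) (n i : Int) (hi : 0 ≤ i)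
    (v : α) :
    PySem.List.pySetD ((PySem.List.pyRange 0 n 1).map g) i v
      = (PySem.List.pyRange 0 n 1).map (fun k => if k = i then v else g k) := by
  rw [PySem.List.pySetD_of_nonneg _ v hi]
  apply List.ext_getElem
  · simp
  · intro j h1 h2
    simp only [List.getElem_set, List.getElem_map]
    have hj : j < (PySem.List.pyRange 0 n 1).length := by simpa using h2
    have hval : (PySem.List.pyRange 0 n 1)[j] = (j : Int) := by
      rw [PySem.List.getElem_pyRange_one]; omega
    rw [hval]
    by_cases hc : j = i.toNat
    · rw [if_pos hc.symm, if_pos (by omega)]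
    · rw [if_neg (fun h => hc h.symm), if_neg (by omega)]

theorem pvModAt_map_pyRange {α : Type} (g : Int → α) (n i : Int) (hi : 0 ≤ i) (hin : i < n)
    (f : α → α) :
    pvModAt ((PySem.List.pyRange 0 n 1).map g) i f
      = (PySem.List.pyRange 0 n 1).map (fun k => if k = i then f (g i) else g k) := by
  have hget : PySem.List.pyGet? ((PySem.List.pyRange 0 n 1).map g) i = some (g i) := by
    rw [PySem.List.pyGet?_of_nonneg _ hi]
    rw [List.getElem?_map]
    have hj : i.toNat < (PySem.List.pyRange 0 n 1).length := by
      simp [PySem.List.length_pyRange_one]; omega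
    rw [List.getElem?_eq_getElem hj]
    have : (PySem.List.pyRange 0 n 1)[i.toNat] = i := by
      rw [PySem.List.getElem_pyRange_one]; omega
    rw [this]
    rfl
  unfold pvModAt
  rw [hget]
  exact pvSetD_map_pyRange g n i hi (f (g i))

theorem pvSet3_build {w d h_ : Int} (f : Int → Int → Int → Bool) {x y z : Int} (v : Bool)
    (hx : 0 ≤ x ∧ x < w) (hy : 0 ≤ y ∧ y < d) (hz : 0 ≤ z ∧ z < h_) :
    pvSet3 (pvBuild w d h_ f) x y z v
      = pvBuild w d h_ (fun a b c => if a = x ∧ b = y ∧ c = z then v else f a b c) := by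
  unfold pvSet3 pvBuild
  rw [pvModAt_map_pyRange _ w x hx.1 hx.2]
  apply List.map_congr_left
  intro a _
  by_cases hax : a = x
  · rw [if_pos hax]
    rw [pvModAt_map_pyRange _ d y hy.1 hy.2]
    apply List.map_congr_left
    intro b _
    by_cases hby : b = y
    · rw [if_pos hby]
      rw [pvSetD_map_pyRange _ h_ z hz.1]
      apply List.map_congr_left
      intro c _
      by_cases hcz : c = z
      · rw [if_pos hcz]; simp [hax, hby, hcz]
      · rw [if_neg hcz]; simp [hax, hby, hcz]
    · rw [if_neg hby]
      apply List.map_congr_left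
      intro c _
      simp [hax, hby]
  · rw [if_neg hax]
    apply List.map_congr_left
    intro b _
    apply List.map_congr_left
    intro c _
    simp [hax]

theorem fold_top (w d h_ : Int) (hd : 0 < d) (hh : 0 < h_) (L : List Int)
    (hL : ∀ x ∈ L, 0 ≤ x ∧ x < w) (f : Int → Int → Int → Bool) :
    L.foldl (fun S x => pvSet3 S x 0 (h_ - 1) true) (pvBuild w d h_ f)
      = pvBuild w d h_ (fun a b c => if a ∈ L ∧ b = 0 ∧ c = h_ - 1 then true else f a b c) := by
  induction L generalizing f with
  | nil => simp only [List.foldl_nil]; exact pvBuild_congr (by intro a b c; simp)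
  | cons x tl ih =>
    rw [List.foldl_cons,
        pvSet3_build f true (hL x (by simp)) ⟨le_refl 0, hd⟩ ⟨by omega, by omega⟩,
        ih (fun z hz => hL z (by simp [hz]))]
    exact pvBuild_congr (by intro a b c; simp only [List.mem_cons]; split_ifs <;> tauto)

theorem fold_back_inner (w d h_ y : Int) (hw : 0 < w) (hy : 0 ≤ y ∧ y < d) (L : List Int)
    (hL : ∀ z ∈ L, 0 ≤ z ∧ z < h_) (f : Int → Int → Int → Bool) :
    L.foldl (fun S z => pvSet3 S 0 y z true) (pvBuild w d h_ f)
      = pvBuild w d h_ (fun a b c => if a = 0 ∧ b = y ∧ c ∈ L then true else f a b c) := by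
  induction L generalizing f with
  | nil => simp only [List.foldl_nil]; exact pvBuild_congr (by intro a b c; simp)
  | cons z tl ih =>
    rw [List.foldl_cons,
        pvSet3_build f true ⟨le_refl 0, hw⟩ hy (hL z (by simp)),
        ih (fun u hu => hL u (by simp [hu]))]
    exact pvBuild_congr (by intro a b c; simp only [List.mem_cons]; split_ifs <;> tauto)

theorem fold_back (w d h_ : Int) (hw : 0 < w) (Ly : List Int)
    (hLy : ∀ y ∈ Ly, 0 ≤ y ∧ y < d) (f : Int → Int → Int → Bool) :
    Ly.foldl (fun S y => (PySem.List.pyRange 0 (h_ - 1) 1).foldl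
        (fun S z => pvSet3 S 0 y z true) S) (pvBuild w d h_ f)
      = pvBuild w d h_ (fun a b c => if a = 0 ∧ b ∈ Ly ∧ 0 ≤ c ∧ c < h_ - 1 then true else f a b c) := by
  induction Ly generalizing f with
  | nil => simp only [List.foldl_nil]; exact pvBuild_congr (by intro a b c; simp)
  | cons y tl ih =>
    rw [List.foldl_cons,
        fold_back_inner w d h_ y hw (hLy y (by simp)) _
          (fun z hz => by rw [PySem.List.mem_pyRange_one] at hz; omega) f,
        ih (fun u hu => hLy u (by simp [hu]))]
    exact pvBuild_congr (by
      intro a b c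
      simp only [List.mem_cons, PySem.List.mem_pyRange_one]
      split_ifs <;> tauto)

theorem fold_side_inner (w d h_ x : Int) (hx : 0 ≤ x ∧ x < w) (hd : 0 < d) (L : List Int)
    (hL : ∀ z ∈ L, 0 ≤ z ∧ z < h_) (f : Int → Int → Int → Bool) :
    L.foldl (fun S z => pvSet3 (pvSet3 S x 0 z true) x (d - 1) z true) (pvBuild w d h_ f)
      = pvBuild w d h_ (fun a b c => if a = x ∧ (b = 0 ∨ b = d - 1) ∧ c ∈ L then true else f a b c) := by
  induction L generalizing f with
  | nil => simp only [List.foldl_nil]; exact pvBuild_congr (by intro a b c; simp)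
  | cons z tl ih =>
    rw [List.foldl_cons,
        pvSet3_build f true hx ⟨le_refl 0, hd⟩ (hL z (by simp)),
        pvSet3_build _ true hx ⟨by omega, by omega⟩ (hL z (by simp)),
        ih (fun u hu => hL u (by simp [hu]))]
    exact pvBuild_congr (by intro a b c; simp only [List.mem_cons]; split_ifs <;> tauto)

theorem fold_side (w d h_ : Int) (hd : 0 < d) (Lx : List Int)
    (hLx : ∀ x ∈ Lx, 0 ≤ x ∧ x < w) (f : Int → Int → Int → Bool) :
    Lx.foldl (fun S x => (PySem.List.pyRange 0 (h_ - 1) 1).foldl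
        (fun S z => pvSet3 (pvSet3 S x 0 z true) x (d - 1) z true) S) (pvBuild w d h_ f)
      = pvBuild w d h_ (fun a b c => if a ∈ Lx ∧ (b = 0 ∨ b = d - 1) ∧ 0 ≤ c ∧ c < h_ - 1 then true else f a b c) := by
  induction Lx generalizing f with
  | nil => simp only [List.foldl_nil]; exact pvBuild_congr (by intro a b c; simp)
  | cons x tl ih =>
    rw [List.foldl_cons,
        fold_side_inner w d h_ x (hLx x (by simp)) hd _
          (fun z hz => by rw [PySem.List.mem_pyRange_one] at hz; omega) f,
        ih (fun u hu => hLx u (by simp [hu]))]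
    exact pvBuild_congr (by
      intro a b c
      simp only [List.mem_cons, PySem.List.mem_pyRange_one]
      split_ifs <;> tauto)

theorem pvSet3_nil (x y z : Int) (v : Bool) : pvSet3 [] x y z v = [] := by
  unfold pvSet3 pvModAt
  simp [PySem.List.pyGet?]

theorem foldl_pvSet3_nil (y : Int) (L : List Int) :
    L.foldl (fun S z => pvSet3 S 0 y z true) ([] : List (List (List Bool))) = [] := by
  induction L with
  | nil => rfl
  | cons z tl ih => rw [List.foldl_cons, pvSet3_nil]; exact ih

theorem main_thm (w d h_ : Int) (hpre : Pre_U_hall w d h_) :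
    U_hall w d h_ = U_hall_alt w d h_ := by
  by_cases hw : w ≤ 0
  · -- the x-range is empty: A carries [] through every loop, B maps over []
    unfold U_hall U_hall_alt
    rw [PySem.List.pyRange_one_eq_nil hw]
    simp only [List.map_nil, List.foldl_nil]
    induction PySem.List.pyRange 0 d 1 with
    | nil => rfl
    | cons y tl ih => rw [List.foldl_cons, foldl_pvSet3_nil]; exact ih
  · have hw1 : 1 ≤ w := by omega
    obtain ⟨hd, hh⟩ := hpre.1 hw1
    have hb : ∀ a : Int, ∀ u ∈ PySem.List.pyRange 0 a 1, 0 ≤ u ∧ u < a := by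
      intro a u hu; rw [PySem.List.mem_pyRange_one] at hu; omega
    show (PySem.List.pyRange 0 w 1).foldl _ ((PySem.List.pyRange 0 d 1).foldl _
      ((PySem.List.pyRange 0 w 1).foldl _ (pvBuild w d h_ (fun _ _ _ => false)))) = _
    rw [fold_side w d h_ (by omega) _ (hb w) _,
        fold_back w d h_ (by omega) _ (hb d) _,
        fold_top w d h_ (by omega) (by omega) _ (hb w) _]
    show _ = pvBuild w d h_ (fun x y z =>
        (y == 0 && z == h_ - 1) || (decide (z < h_ - 1) && (y == 0 || y == d - 1 || x == 0)))
    apply pvBuild_congr_mem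
    intro a b c ha0 haw hb0 hbd hc0 hch
    simp only [PySem.List.mem_pyRange_one]
    split_ifs <;> simp_all <;> omega

-- ===== VERDICT (by name: the statement is the Claim_ definition above) =====
theorem U_hall_spec : Claim_equal_U_hall := by
  intro w d h_ _ hpre
  unfold Spec_U_hall
  exact main_thm w d h_ hpre
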